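-- pv_equiv track=rewrite | github.com/mad3310/beehive | src/api/resource/resourceVerify.py | get_host_ip_list
-- ===== SOURCE A (Python) =====
-- def get_host_ip_list(host_ip_list, container_num):
--
--     ip_list = []
--
--     for i in range(container_num):
--         for index,(host_ip, available_host_num) in enumerate(host_ip_list):
--             if available_host_num > 0:
--                 ip_list.append(host_ip)
--                 host_ip_list[index] = (host_ip, available_host_num - 1)
--             if len(ip_list) == container_num:
--                 return ip_list
--     return ip_list
-- ===== SOURCE B (Python) =====
-- def get_host_ip_list(host_ip_list, container_num):
--     # Note: A mutates host_ip_list in place; B does not (return value is identical).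
--     result = []
--     for r in range(container_num):
--         round_ips = [ip for ip, c in host_ip_list if c > r]
--         if not round_ips:
--             break
--         need = container_num - len(result)  # need >= 1 here
--         if len(round_ips) >= need:
--             result += round_ips[:need]
--             break
--         result += round_ips
--     return result
-- ===== Notes on version B (the rewrite author's own statement) =====
-- stated objective: alternative
-- what changed: B computes the round-robin schedule directly from the immutable capacities (round r takes every host with capacity > r, in list order) and stops as soon as the quota is met or capacity is exhausted, instead of A's container_num iterations of a rescan-and-mutate loop; B also does not mutate host_ip_list.
import Mathlib
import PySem

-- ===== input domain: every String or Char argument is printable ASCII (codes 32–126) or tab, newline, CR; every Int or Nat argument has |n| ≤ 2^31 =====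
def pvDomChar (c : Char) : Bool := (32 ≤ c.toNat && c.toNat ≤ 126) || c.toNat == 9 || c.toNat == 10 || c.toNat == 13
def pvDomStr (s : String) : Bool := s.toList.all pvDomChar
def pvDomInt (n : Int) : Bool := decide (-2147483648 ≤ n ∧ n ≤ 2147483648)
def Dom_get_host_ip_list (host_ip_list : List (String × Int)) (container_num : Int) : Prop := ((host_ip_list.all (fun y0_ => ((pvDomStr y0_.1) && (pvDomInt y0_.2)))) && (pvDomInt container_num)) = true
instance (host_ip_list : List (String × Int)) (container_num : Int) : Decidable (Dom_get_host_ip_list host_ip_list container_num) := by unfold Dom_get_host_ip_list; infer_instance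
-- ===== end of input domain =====

-- B schedules round-robin directly from the capacities (round r takes every host with
-- capacity > r) and stops as soon as the quota is met or capacity is exhausted, instead of
-- A's mutate-and-rescan loop run container_num times; A mutates host_ip_list in place and
-- B does not — the equivalence proved here is about the return value only.


-- ===== PORT A =====
-- Inner `for index,(host_ip, available_host_num) in enumerate(host_ip_list)` loop; the
-- in-place `host_ip_list[index] = …` mutation is modeled by rebuilding the list;
-- `Sum.inl` is the early `return ip_list`.
def innerA (n : Int) : List (String × Int) → List String →
    (List String ⊕ (List (String × Int) × List String))
  | [], acc => Sum.inr ([], acc)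
  | (ip, c) :: rest, acc =>
    if c > 0 then
      let acc' := acc ++ [ip]
      if (acc'.length : Int) = n then Sum.inl acc'
      else
        match innerA n rest acc' with
        | Sum.inl r => Sum.inl r
        | Sum.inr (hs, a) => Sum.inr ((ip, c - 1) :: hs, a)
    else
      if (acc.length : Int) = n then Sum.inl acc
      else
        match innerA n rest acc with
        | Sum.inl r => Sum.inl r
        | Sum.inr (hs, a) => Sum.inr ((ip, c) :: hs, a)

-- Outer `for i in range(container_num)` loop (counted down as fuel).
def outerA (n : Int) : Nat → List (String × Int) → List String → List String
  | 0, _, acc => acc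
  | k+1, hs, acc =>
    match innerA n hs acc with
    | Sum.inl r => r
    | Sum.inr (hs', acc') => outerA n k hs' acc'

def get_host_ip_list (host_ip_list : List (String × Int)) (container_num : Int) : List String :=
  outerA container_num container_num.toNat host_ip_list []

-- ===== PORT B =====
-- `for r in range(container_num)` with the two `break`s; `round_ips[:need]` is `take`
-- (exact: need ≥ 1 whenever that slice is taken).
def loopB (hs : List (String × Int)) (n : Int) : Nat → Int → List String → List String
  | 0, _, acc => acc
  | k+1, r, acc =>
    let round := (hs.filter (fun p => p.2 > r)).map Prod.fst
    if round = [] then acc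
    else
      let need := n - (acc.length : Int)
      if (round.length : Int) ≥ need then acc ++ round.take need.toNat
      else loopB hs n k (r+1) (acc ++ round)

def get_host_ip_list_alt (host_ip_list : List (String × Int)) (container_num : Int) : List String :=
  loopB host_ip_list container_num container_num.toNat 0 []

-- ===== PRECONDITION & SPEC =====
def Spec_get_host_ip_list (host_ip_list : List (String × Int)) (container_num : Int) (out : List String) : Prop := out = get_host_ip_list_alt host_ip_list container_num
instance (host_ip_list : List (String × Int)) (container_num : Int) (out : List String) : Decidable (Spec_get_host_ip_list host_ip_list container_num out) := by unfold Spec_get_host_ip_list; infer_instance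

-- ===== CLAIM (what is proved, stated in full; the proofs are below) =====
def Claim_equal_get_host_ip_list : Prop := ∀ (host_ip_list : List (String × Int)) (container_num : Int), Dom_get_host_ip_list host_ip_list container_num → Spec_get_host_ip_list host_ip_list container_num (get_host_ip_list host_ip_list container_num)

-- ===== LEMMAS AND PROOFS =====

-- One pass of A's inner loop decrements every positive capacity …
def stepH (hs : List (String × Int)) : List (String × Int) :=
  hs.map (fun p => if p.2 > 0 then (p.1, p.2 - 1) else p)

-- … and emits the ips of the positive-capacity hosts, in order.
def emitsH (hs : List (String × Int)) : List String :=
  (hs.filter (fun p => p.2 > 0)).map Prod.fst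

lemma innerA_spec (n : Int) (hs : List (String × Int)) :
    ∀ acc : List String, (acc.length : Int) < n →
    innerA n hs acc =
      if n ≤ (acc.length : Int) + (emitsH hs).length
      then Sum.inl (acc ++ (emitsH hs).take (n - acc.length).toNat)
      else Sum.inr (stepH hs, acc ++ emitsH hs) := by
  induction hs with
  | nil =>
    intro acc h
    simp [innerA, emitsH, stepH]
    omega
  | cons p rest ih =>
    obtain ⟨ip, c⟩ := p
    intro acc h
    by_cases hc : c > 0
    · have hem : emitsH ((ip, c) :: rest) = ip :: emitsH rest := by simp [emitsH, hc]
      have hst : stepH ((ip, c) :: rest) = (ip, c - 1) :: stepH rest := by simp [stepH, hc]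
      by_cases hn : (acc.length : Int) + 1 = n
      · have hcc : n ≤ (acc.length : Int) + (emitsH ((ip, c) :: rest)).length := by
          rw [hem]; simp; omega
        rw [if_pos hcc]
        have ht : (n - (acc.length : Int)).toNat = 1 := by omega
        simp [innerA, hc, hem, ht, hn]
      · have hmain : innerA n ((ip, c) :: rest) acc =
            (match innerA n rest (acc ++ [ip]) with
              | Sum.inl r => Sum.inl r
              | Sum.inr (hs, a) => Sum.inr ((ip, c - 1) :: hs, a)) := by
          simp [innerA, hc, hn]
        rw [hmain, ih (acc ++ [ip]) (by simp; omega)]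
        by_cases hcond : n ≤ ((acc ++ [ip]).length : Int) + (emitsH rest).length
        · rw [if_pos hcond]
          have hcond2 : n ≤ (acc.length : Int) + (emitsH ((ip, c) :: rest)).length := by
            rw [hem]; simp at hcond ⊢; omega
          rw [if_pos hcond2]
          have h1 : (n - (acc.length : Int)).toNat = (n - ((acc ++ [ip]).length : Int)).toNat + 1 := by
            simp; omega
          simp [hem, h1]
        · rw [if_neg hcond]
          have hcond2 : ¬ n ≤ (acc.length : Int) + (emitsH ((ip, c) :: rest)).length := by
            rw [hem]; simp at hcond ⊢; omega
          rw [if_neg hcond2]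
          simp [hem, hst]
    · have hem : emitsH ((ip, c) :: rest) = emitsH rest := by simp [emitsH, hc]
      have hst : stepH ((ip, c) :: rest) = (ip, c) :: stepH rest := by simp [stepH, hc]
      have hne : ¬ ((acc.length : Int) = n) := by omega
      have hmain : innerA n ((ip, c) :: rest) acc =
          (match innerA n rest acc with
            | Sum.inl r => Sum.inl r
            | Sum.inr (hs, a) => Sum.inr ((ip, c) :: hs, a)) := by
        simp [innerA, hc, hne]
      rw [hmain, ih acc h]
      by_cases hcond : n ≤ (acc.length : Int) + (emitsH rest).length
      · rw [if_pos hcond, if_pos (by rw [hem]; exact hcond)]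
        simp [hem]
      · rw [if_neg hcond, if_neg (by rw [hem]; exact hcond)]
        simp [hem, hst]

lemma round_step (hs : List (String × Int)) (r : Int) (hr : 0 ≤ r) :
    ((stepH hs).filter (fun p => p.2 > r)) = (hs.filter (fun p => p.2 > r + 1)).map (fun p => (p.1, p.2 - 1)) := by
  induction hs with
  | nil => simp [stepH]
  | cons p rest ih =>
    obtain ⟨ip, c⟩ := p
    by_cases hc : c > 0
    · by_cases hcr : c > r + 1
      · have : c - 1 > r := by omega
        simp [stepH, hc, hcr, this] at ih ⊢
        exact ih
      · have : ¬ (c - 1 > r) := by omega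
        simp [stepH, hc, hcr, this] at ih ⊢
        exact ih
    · have h1 : ¬ (c > r) := by omega
      have h2 : ¬ (c > r + 1) := by omega
      simp [stepH, hc, h1, h2] at ih ⊢
      exact ih

lemma loopB_shift (n : Int) (k : Nat) :
    ∀ (hs : List (String × Int)) (r : Int) (acc : List String), 0 ≤ r →
    loopB hs n k (r + 1) acc = loopB (stepH hs) n k r acc := by
  induction k with
  | zero => intro hs r acc hr; simp [loopB]
  | succ k ih =>
    intro hs r acc hr
    have hround : ((stepH hs).filter (fun p => p.2 > r)).map Prod.fst
        = (hs.filter (fun p => p.2 > r + 1)).map Prod.fst := by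
      rw [round_step hs r hr]; simp
    simp only [loopB, hround]
    split_ifs with h1 h2
    · rfl
    · rfl
    · rw [ih hs (r + 1) _ (by omega)]

lemma main_eq (n : Int) : ∀ (k : Nat) (hs : List (String × Int)) (acc : List String),
    (acc.length : Int) < n → outerA n k hs acc = loopB hs n k 0 acc := by
  intro k
  induction k with
  | zero => intro hs acc h; simp [outerA, loopB]
  | succ k ih =>
    intro hs acc h
    have hround : (hs.filter (fun p => p.2 > (0 : Int))).map Prod.fst = emitsH hs := by
      simp [emitsH]
    rw [outerA, innerA_spec n hs acc h]
    by_cases hcond : n ≤ (acc.length : Int) + (emitsH hs).length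
    · rw [if_pos hcond]
      have hne : emitsH hs ≠ [] := by
        intro he; rw [he] at hcond; simp at hcond; omega
      simp only [loopB, hround]
      rw [if_neg hne, if_pos (by simp; omega)]
    · rw [if_neg hcond]
      by_cases he : emitsH hs = []
      · have hfil : hs.filter (fun p => p.2 > (0 : Int)) = [] := by
          have h' := he
          unfold emitsH at h'
          exact List.map_eq_nil_iff.mp h'
        have hstep : stepH hs = hs := by
          unfold stepH
          conv_rhs => rw [← List.map_id hs]
          apply List.map_congr_left
          intro p hp
          have hnp : ¬ (p.2 > 0) := by
            intro hpos
            have : p ∈ hs.filter (fun p => p.2 > (0:Int)) := by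
              simp [List.mem_filter, hp, hpos]
            rw [hfil] at this; simp at this
          simp [hnp]
        rw [he, List.append_nil, hstep]
        show outerA n k hs acc = loopB hs n (k+1) 0 acc
        rw [ih hs acc h]
        have hnil : (hs.filter (fun p => p.2 > (0:Int))).map Prod.fst = [] := by
          rw [hround]; exact he
        cases k with
        | zero => simp only [loopB, hnil]; simp
        | succ k => simp only [loopB, hnil]; simp
      · simp only [loopB, hround]
        rw [if_neg he, if_neg (by simp at hcond ⊢; omega)]
        show outerA n k (stepH hs) (acc ++ emitsH hs) = loopB hs n k (0+1) (acc ++ emitsH hs)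
        rw [ih (stepH hs) (acc ++ emitsH hs) (by simp at hcond ⊢; omega)]
        rw [loopB_shift n k hs 0 (acc ++ emitsH hs) le_rfl]

-- ===== VERDICT (by name: the statement is the Claim_ definition above) =====
theorem get_host_ip_list_spec : Claim_equal_get_host_ip_list := by
  intro hs n _
  unfold Spec_get_host_ip_list get_host_ip_list get_host_ip_list_alt
  by_cases hn : 0 < n
  · exact main_eq n n.toNat hs [] (by simp; omega)
  · have : n.toNat = 0 := by omega
    simp [this, outerA, loopB]
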